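-- pv_equiv track=rewrite | github.com/Cdguzmanr/Cdguzmanr-TP1-Carlos-Samuel- | TP1_Carlos_Samuel.py | procesarCodPalabraInver
-- ===== SOURCE A (Python) =====
-- def procesarCodPalabraInver(pfrase, accion):
--     """
--     Funcionamiento: Codifica y decodifica una frase con el método de Palabra inversa
--     Entradas: pfrase (str) frase a trabajar
--     Salidas: Resultado del proceso
--     #_____________________________#
--     Comentario adicional: Este método es muy sencillo, la codificación y decodificación utilizan el mismo proceso.
--     Por lo tanto, unicamente se diferenció la impresión del resultado, utilizando el segundo parámetro (accion)
--     """
--     palabra,inversa=[],""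
--     palabra = pfrase[::-1].split(" ")
--     i=-1
--     for n in range(len(palabra)):
--         inversa+= palabra[i]
--         inversa+=" "
--         i-=1
--     return f"Mensaje {accion}: {inversa}"
-- ===== SOURCE B (Python) =====
-- def procesarCodPalabraInver(pfrase, accion):
--     inversa = "".join(p[::-1] + " " for p in pfrase.split(" "))
--     return f"Mensaje {accion}: {inversa}"
-- ===== Notes on version B (the rewrite author's own statement) =====
-- stated objective: idiomatic
-- what changed: B splits the original phrase on a single space and reverses each word locally in one join-comprehension, instead of A's global string reversal followed by a manual backwards walk over the split list with a hand-maintained negative index.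
import Mathlib
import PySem

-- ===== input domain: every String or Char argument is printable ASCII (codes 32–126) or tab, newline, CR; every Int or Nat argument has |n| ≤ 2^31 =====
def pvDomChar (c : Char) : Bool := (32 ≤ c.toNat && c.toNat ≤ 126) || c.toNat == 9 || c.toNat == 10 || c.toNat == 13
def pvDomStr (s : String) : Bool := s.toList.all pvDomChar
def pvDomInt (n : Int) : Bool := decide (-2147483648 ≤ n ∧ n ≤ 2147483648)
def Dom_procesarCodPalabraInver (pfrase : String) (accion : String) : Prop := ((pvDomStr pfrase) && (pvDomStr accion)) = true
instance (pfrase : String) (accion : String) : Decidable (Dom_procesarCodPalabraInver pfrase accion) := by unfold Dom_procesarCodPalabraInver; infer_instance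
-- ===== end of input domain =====

-- B reverses each word of the original phrase locally and joins them, instead of A's
-- global string reversal followed by walking the split list backwards with a manual
-- negative index (objective: simpler/idiomatic; same asymptotic cost).

-- ===== PORT A =====
-- palabra = pfrase[::-1].split(" "): step -1 ≠ 0 and sep ≠ "" so both primitives always
-- return some; .getD only discharges the Option. palabra[i] with i running -1, -2, … over
-- range(len(palabra)) is always in range, so .getD "" after pyGet? is exact (no IndexError).
def procesarCodPalabraInver (pfrase : String) (accion : String) : String :=
  let palabra : List String :=
    (PySem.Str.split? ((PySem.Str.slice? pfrase none none (-1)).getD "") " ").getD []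
  let st :=
    (PySem.List.pyRange 0 (palabra.length : Int) 1).foldl
      (fun (st : String × Int) _n =>
        (st.1 ++ (PySem.List.pyGet? palabra st.2).getD "" ++ " ", st.2 - 1))
      ("", -1)
  "Mensaje " ++ accion ++ ": " ++ st.1

-- ===== PORT B =====
-- inversa = "".join(p[::-1] + " " for p in pfrase.split(" "))
def procesarCodPalabraInver_alt (pfrase : String) (accion : String) : String :=
  let inversa : String :=
    PySem.Str.join ""
      (((PySem.Str.split? pfrase " ").getD []).map
        (fun p => ((PySem.Str.slice? p none none (-1)).getD "") ++ " "))
  "Mensaje " ++ accion ++ ": " ++ inversa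

-- ===== PRECONDITION & SPEC =====
def Spec_procesarCodPalabraInver (pfrase : String) (accion : String) (out : String) : Prop := out = procesarCodPalabraInver_alt pfrase accion
instance (pfrase : String) (accion : String) (out : String) : Decidable (Spec_procesarCodPalabraInver pfrase accion out) := by unfold Spec_procesarCodPalabraInver; infer_instance

-- ===== CLAIM (what is proved, stated in full; the proofs are below) =====
def Claim_equal_procesarCodPalabraInver : Prop := ∀ (pfrase : String) (accion : String), Dom_procesarCodPalabraInver pfrase accion → Spec_procesarCodPalabraInver pfrase accion (procesarCodPalabraInver pfrase accion)

-- ===== LEMMAS AND PROOFS =====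

-- A simple right-to-left specification of Python's split on the single-space separator.
def pvSplitC : List Char → List (List Char)
  | [] => [[]]
  | c :: rest =>
    if c = ' ' then [] :: pvSplitC rest
    else match pvSplitC rest with
      | [] => [[c]]
      | w :: ws => (c :: w) :: ws

lemma pvSplitC_ne_nil (l : List Char) : pvSplitC l ≠ [] := by
  cases l with
  | nil => simp [pvSplitC]
  | cons c rest =>
    simp only [pvSplitC]
    split_ifs
    · simp
    · cases h : pvSplitC rest <;> simp

def pvConsHead (pre : List Char) : List (List Char) → List (List Char)
  | [] => [pre]
  | w :: ws => (pre ++ w) :: ws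

lemma pv_go_spec (l : List Char) : ∀ (fuel : Nat) (cur : List Char) (acc : List (List Char)),
    l.length ≤ fuel →
    PySem.Chars.splitOn.go [' '] fuel l cur acc
      = acc.reverse ++ pvConsHead cur.reverse (pvSplitC l) := by
  induction l with
  | nil =>
    intro fuel cur acc _
    cases fuel <;> rw [PySem.Chars.splitOn.go] <;> simp [pvSplitC, pvConsHead]
  | cons c rest ih =>
    intro fuel cur acc hf
    cases fuel with
    | zero => simp at hf
    | succ fuel =>
      by_cases hc : c = ' '
      · subst hc
        rw [PySem.Chars.splitOn.go]
        rw [if_pos (by simp [List.isPrefixOf])]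
        have hdrop : List.drop [' '].length (' ' :: rest) = rest := rfl
        rw [hdrop, ih fuel [] (cur.reverse :: acc) (by simpa using hf)]
        rcases h : pvSplitC rest with _ | ⟨w, ws⟩
        · exact absurd h (pvSplitC_ne_nil rest)
        · simp [pvSplitC, pvConsHead, h]
      · rw [PySem.Chars.splitOn.go]
        rw [if_neg (by simp [List.isPrefixOf]; exact fun h => absurd h.symm hc)]
        rw [ih fuel (c :: cur) acc (by simpa using hf)]
        rcases h : pvSplitC rest with _ | ⟨w, ws⟩
        · exact absurd h (pvSplitC_ne_nil rest)
        · simp [pvSplitC, pvConsHead, h, hc]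

lemma pv_splitOn_space (l : List Char) : PySem.Chars.splitOn l [' '] = pvSplitC l := by
  rw [PySem.Chars.splitOn, pv_go_spec l (l.length + 1) [] [] (by omega)]
  rcases h : pvSplitC l with _ | ⟨w, ws⟩
  · exact absurd h (pvSplitC_ne_nil l)
  · simp [pvConsHead]

def pvSnocW (c : Char) : List (List Char) → List (List Char)
  | [] => [[c]]
  | [w] => [w ++ [c]]
  | w :: ws => w :: pvSnocW c ws

lemma pvSnocW_append_singleton (c : Char) (X : List (List Char)) (w : List Char) :
    pvSnocW c (X ++ [w]) = X ++ [w ++ [c]] := by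
  induction X with
  | nil => rfl
  | cons x xs ih =>
    cases xs with
    | nil => simp [pvSnocW]
    | cons y ys => simpa [pvSnocW] using ih

lemma pvSplitC_append (xs : List Char) (c : Char) :
    pvSplitC (xs ++ [c]) = if c = ' ' then pvSplitC xs ++ [[]] else pvSnocW c (pvSplitC xs) := by
  induction xs with
  | nil =>
    by_cases hc : c = ' ' <;> simp [pvSplitC, pvSnocW, hc]
  | cons x xs ih =>
    by_cases hc : c = ' '
    · simp only [if_pos hc] at ih ⊢
      by_cases hx : x = ' '
      · simp [pvSplitC, hx, ih]
      · rcases h : pvSplitC xs with _ | ⟨w, ws⟩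
        · exact absurd h (pvSplitC_ne_nil xs)
        · simp [pvSplitC, hx, ih, h]
    · simp only [if_neg hc] at ih ⊢
      by_cases hx : x = ' '
      · rcases h : pvSplitC xs with _ | ⟨w, ws⟩
        · exact absurd h (pvSplitC_ne_nil xs)
        · simp [pvSplitC, hx, ih, h, pvSnocW]
      · rcases h : pvSplitC xs with _ | ⟨w, ws⟩
        · exact absurd h (pvSplitC_ne_nil xs)
        · cases ws with
          | nil => simp [pvSplitC, pvSnocW, hx, ih, h]
          | cons v vs => simp [pvSplitC, pvSnocW, hx, ih, h]

lemma pvSplitC_reverse (l : List Char) :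
    pvSplitC l.reverse = (pvSplitC l).reverse.map List.reverse := by
  induction l with
  | nil => rfl
  | cons c rest ih =>
    by_cases hc : c = ' '
    · subst hc
      simp only [List.reverse_cons, pvSplitC_append, ih, pvSplitC]
      simp
    · rcases h : pvSplitC rest with _ | ⟨w, ws⟩
      · exact absurd h (pvSplitC_ne_nil rest)
      · simp only [List.reverse_cons, pvSplitC_append, if_neg hc, ih, h]
        simp only [List.map_append, List.map_cons, List.map_nil]
        rw [pvSnocW_append_singleton]
        simp [pvSplitC, h, hc]

lemma pv_pyGet?_neg {α : Type} (xs : List α) (k : Nat) (hk : k < xs.length) :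
    PySem.List.pyGet? xs (-(k : Int) - 1) = some (xs.reverse[k]'(by simpa using hk)) := by
  simp only [PySem.List.pyGet?, PySem.List.pyIdx?]
  rw [if_neg (by omega), if_pos (by omega)]
  have h1 : ((-(-(k : Int) - 1)).toNat) = k + 1 := by omega
  rw [h1, Option.bind_some]
  rw [List.getElem?_eq_getElem (by omega)]
  congr 1
  rw [List.getElem_reverse]
  congr 1
  omega

lemma pv_loop_inv (palabra : List String) (k : Nat) (hk : k ≤ palabra.length) :
    (PySem.List.pyRange 0 (k : Int) 1).foldl
      (fun (st : String × Int) _n =>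
        (st.1 ++ (PySem.List.pyGet? palabra st.2).getD "" ++ " ", st.2 - 1))
      ("", -1)
    = (String.ofList (((palabra.reverse.take k).map (fun w => w.toList ++ [' '])).flatten),
       -(k : Int) - 1) := by
  induction k with
  | zero => simp
  | succ k ih =>
    have hk' : k ≤ palabra.length := by omega
    have hsplit : PySem.List.pyRange 0 ((k : Int) + 1) 1
        = PySem.List.pyRange 0 (k : Int) 1 ++ [(k : Int)] :=
      PySem.List.pyRange_one_succ_right (by omega)
    have hcast : ((k + 1 : Nat) : Int) = (k : Int) + 1 := by push_cast; ring
    rw [hcast, hsplit, List.foldl_append, ih hk']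
    simp only [List.foldl_cons, List.foldl_nil]
    rw [pv_pyGet?_neg palabra k (by omega)]
    have htake : palabra.reverse.take (k + 1)
        = palabra.reverse.take k ++ [palabra.reverse[k]'(by simpa using hk)] := by
      rw [List.take_add_one, List.getElem?_eq_getElem (by simpa using hk)]
      rfl
    rw [Prod.ext_iff]
    constructor
    · simp only
      rw [htake]
      simp only [List.map_append, List.map_cons, List.map_nil, List.flatten_append,
        List.flatten_cons, List.flatten_nil, List.append_nil, ← List.append_assoc]
      rw [String.ofList_append, String.ofList_append, String.ofList_toList]
      rfl
    · simp only
      ring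

lemma pv_space_toList : (" " : String).toList = [' '] := rfl

lemma pv_join_nil (l : List (List Char)) : List.intercalate [] l = l.flatten := by
  induction l with
  | nil => rfl
  | cons w ws ih =>
    cases ws with
    | nil => simp [List.intercalate]
    | cons v vs => simp_all [List.intercalate, List.intersperse]

lemma pv_words_B (pfrase : String) :
    (PySem.Str.split? pfrase " ").getD [] = (pvSplitC pfrase.toList).map String.ofList := by
  simp only [PySem.Str.split?, PySem.Chars.split?]
  have h1 : (" " : String).toList = [' '] := rfl
  rw [h1]
  simp [pv_splitOn_space]

-- ===== VERDICT (by name: the statement is the Claim_ definition above) =====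
theorem procesarCodPalabraInver_spec : Claim_equal_procesarCodPalabraInver := by
  intro pfrase accion _
  unfold Spec_procesarCodPalabraInver procesarCodPalabraInver procesarCodPalabraInver_alt
  rw [PySem.Str.slice?_none_none_neg_one]
  simp only [Option.getD_some, pv_words_B, String.toList_ofList]
  rw [pv_loop_inv _ _ (le_refl _)]
  congr 1
  rw [List.take_of_length_le (by simp)]
  simp only [PySem.Str.join, String.toList_empty, PySem.Chars.join, pv_join_nil, pvSplitC_reverse,
    List.map_reverse, List.reverse_reverse, List.map_map, Function.comp_def,
    PySem.Str.slice?_none_none_neg_one, Option.getD_some, String.toList_append, String.toList_ofList,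
    pv_space_toList]
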